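-- pv_equiv track=rewrite | github.com/danieldeutsch/gcd | gcd/inference/beam_search/util.py | ensure_one_end_index
-- ===== SOURCE A (Python) =====
-- from typing import List
--
-- def ensure_one_end_index(sequence: List[int], end_index: int):
--     stripped = []
--     for token in sequence:
--         if token != end_index:
--             stripped.append(token)
--         else:
--             stripped.append(token)
--             break
--
--     if stripped[-1] != end_index:
--         stripped.append(end_index)
--
--     return stripped
-- ===== SOURCE B (Python) =====
-- def ensure_one_end_index(sequence, end_index):
--     if end_index in sequence:
--         i = sequence.index(end_index)
--         return sequence[:i + 1]
--     return list(sequence) + [end_index]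
-- ===== Notes on version B (the rewrite author's own statement) =====
-- stated objective: idiomatic
-- what changed: Replaces the incremental append-and-break loop plus trailing-element check by a locate-then-slice decomposition: find the first end_index and slice through it, otherwise copy and append end_index.
-- outside the precondition, e.g. on ensure_one_end_index([], 7): A raises IndexError, B returns [7]
-- crash fix: On the empty sequence A raises IndexError (stripped[-1] on an empty list) while B returns [end_index]. — e.g. on ensure_one_end_index([], 7): A raises IndexError, B returns [7]
import Mathlib
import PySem

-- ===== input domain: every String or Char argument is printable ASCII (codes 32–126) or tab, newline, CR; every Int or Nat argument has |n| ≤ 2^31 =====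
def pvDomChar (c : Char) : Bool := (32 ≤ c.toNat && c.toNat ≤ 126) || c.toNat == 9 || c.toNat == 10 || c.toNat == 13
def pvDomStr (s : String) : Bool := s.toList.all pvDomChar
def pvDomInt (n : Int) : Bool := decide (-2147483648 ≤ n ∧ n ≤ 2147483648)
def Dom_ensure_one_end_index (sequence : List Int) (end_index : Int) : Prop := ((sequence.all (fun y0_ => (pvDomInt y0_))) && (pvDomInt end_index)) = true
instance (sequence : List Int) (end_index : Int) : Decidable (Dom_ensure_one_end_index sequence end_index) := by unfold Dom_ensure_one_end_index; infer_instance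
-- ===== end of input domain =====

-- B replaces A's append-and-break loop + trailing check by locate-then-slice (idiomatic; return value only).

-- ===== PORT A =====
-- the for-loop with break, accumulating 'stripped'
def pvStripA (end_index : Int) : List Int → List Int
  | [] => []
  | t :: ts => if t ≠ end_index then t :: pvStripA end_index ts else [t]

def ensure_one_end_index (sequence : List Int) (end_index : Int) : List Int :=
  let stripped := pvStripA end_index sequence
  match PySem.List.pyGet? stripped (-1) with
  | some last => if last ≠ end_index then stripped ++ [end_index] else stripped
  | none => stripped   -- Python raises IndexError here (only when sequence = []); excluded by Pre_

-- ===== PORT B =====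
def ensure_one_end_index_alt (sequence : List Int) (end_index : Int) : List Int :=
  match PySem.List.index? sequence end_index with
  | some i => PySem.List.slice sequence none (some ((i : Int) + 1))
  | none => sequence ++ [end_index]

-- ===== PRECONDITION & SPEC =====
-- Pre_ excludes only the empty sequence, on which A raises IndexError (stripped[-1] on []).
def Pre_ensure_one_end_index (sequence : List Int) (end_index : Int) : Prop := sequence ≠ []
instance (sequence : List Int) (end_index : Int) : Decidable (Pre_ensure_one_end_index sequence end_index) := by unfold Pre_ensure_one_end_index; infer_instance

def pvWitness_ensure_one_end_index : List Int × Int := ([1, 2, 3], 2)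

-- On the empty sequence A raises IndexError while B returns [end_index].
def Raises_ensure_one_end_index (sequence : List Int) (end_index : Int) : Prop := sequence = []
instance (sequence : List Int) (end_index : Int) : Decidable (Raises_ensure_one_end_index sequence end_index) := by unfold Raises_ensure_one_end_index; infer_instance
def pvRaiseWitness_ensure_one_end_index : List Int × Int := ([], 7)
def pvRaiseWitnessOut_ensure_one_end_index : List Int := [7]

def Spec_ensure_one_end_index (sequence : List Int) (end_index : Int) (out : List Int) : Prop := out = ensure_one_end_index_alt sequence end_index
instance (sequence : List Int) (end_index : Int) (out : List Int) : Decidable (Spec_ensure_one_end_index sequence end_index out) := by unfold Spec_ensure_one_end_index; infer_instance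

-- ===== CLAIM (what is proved, stated in full; the proofs are below) =====
def Claim_equal_ensure_one_end_index : Prop := ∀ (sequence : List Int) (end_index : Int), Dom_ensure_one_end_index sequence end_index → Pre_ensure_one_end_index sequence end_index → Spec_ensure_one_end_index sequence end_index (ensure_one_end_index sequence end_index)
def Claim_raises_ensure_one_end_index : Prop := (∀ (sequence : List Int) (end_index : Int), Dom_ensure_one_end_index sequence end_index → Raises_ensure_one_end_index sequence end_index → ¬ Pre_ensure_one_end_index sequence end_index) ∧ (Dom_ensure_one_end_index (pvRaiseWitness_ensure_one_end_index.1) (pvRaiseWitness_ensure_one_end_index.2) ∧ Raises_ensure_one_end_index (pvRaiseWitness_ensure_one_end_index.1) (pvRaiseWitness_ensure_one_end_index.2) ∧ ensure_one_end_index_alt (pvRaiseWitness_ensure_one_end_index.1) (pvRaiseWitness_ensure_one_end_index.2) = pvRaiseWitnessOut_ensure_one_end_index)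

-- ===== LEMMAS AND PROOFS =====

-- A's loop result characterised via the first occurrence of end_index
theorem pvStripA_eq (end_index : Int) (sequence : List Int) :
    pvStripA end_index sequence =
      match PySem.List.index? sequence end_index with
      | some i => sequence.take (i + 1)
      | none => sequence := by
  induction sequence with
  | nil => simp [pvStripA, PySem.List.index?]
  | cons t ts ih =>
    by_cases h : t = end_index
    · subst h
      rw [PySem.List.index?_cons_self]
      simp [pvStripA]
    · rw [PySem.List.index?_cons_of_ne ts h]
      cases hts : PySem.List.index? ts end_index with
      | none => rw [hts] at ih; simp [pvStripA, h, ih]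
      | some i => rw [hts] at ih; simp [pvStripA, h, ih]

theorem ensure_one_end_index_spec : Claim_equal_ensure_one_end_index := by
  intro sequence end_index _ hpre
  unfold Spec_ensure_one_end_index ensure_one_end_index ensure_one_end_index_alt
  cases hidx : PySem.List.index? sequence end_index with
  | none =>
    -- no occurrence: stripped = sequence, its last element ≠ end_index
    have hnotmem : end_index ∉ sequence := (PySem.List.index?_eq_none_iff sequence end_index).mp hidx
    have hstrip : pvStripA end_index sequence = sequence := by
      rw [pvStripA_eq, hidx]
    show (match PySem.List.pyGet? (pvStripA end_index sequence) (-1) with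
      | some last => if last ≠ end_index then pvStripA end_index sequence ++ [end_index] else pvStripA end_index sequence
      | none => pvStripA end_index sequence) = _
    rw [hstrip, PySem.List.pyGet?_neg_one]
    cases hlast : sequence.getLast? with
    | none => exact absurd (List.getLast?_eq_none_iff.mp hlast) hpre
    | some v =>
      have hv : v ∈ sequence := List.mem_of_getLast? hlast
      have : v ≠ end_index := fun h => hnotmem (h ▸ hv)
      simp [this]
  | some i =>
    -- first occurrence at i: stripped = take (i+1), ends with end_index
    have hstrip : pvStripA end_index sequence = sequence.take (i + 1) := by
      rw [pvStripA_eq, hidx]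
    obtain ⟨hk, hget, _⟩ := PySem.List.getElem_of_index?_eq_some hidx
    have hlast : (sequence.take (i + 1)).getLast? = some end_index := by
      rw [List.getLast?_eq_getElem?]
      have hlen : (sequence.take (i + 1)).length = i + 1 := by
        simp [List.length_take]; omega
      rw [hlen]
      simp only [Nat.add_sub_cancel]
      rw [List.getElem?_take_of_lt (by omega)]
      simp [List.getElem?_eq_getElem hk, hget]
    show (match PySem.List.pyGet? (pvStripA end_index sequence) (-1) with
      | some last => if last ≠ end_index then pvStripA end_index sequence ++ [end_index] else pvStripA end_index sequence
      | none => pvStripA end_index sequence) = _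
    rw [hstrip, PySem.List.pyGet?_neg_one, hlast]
    dsimp only
    have hcast : ((i : Int) + 1) = ((i + 1 : Nat) : Int) := by push_cast; ring
    rw [hcast, PySem.List.slice_to_natCast]
    simp

@[simp] theorem ensure_one_end_index_raises : Claim_raises_ensure_one_end_index := by
  unfold Claim_raises_ensure_one_end_index
  exact ⟨fun seq e _ hr => by simp [Pre_ensure_one_end_index, Raises_ensure_one_end_index] at *; exact hr, by decide⟩
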